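-- pv_equiv track=rewrite | github.com/BaronMunghauzen/ninjaTrainingFastApi | app/user_program_plan/training_builder.py | _difficulty_fallback_order
-- ===== SOURCE A (Python) =====
-- from typing import Optional, List, Tuple, Dict, Any, Set
--
-- _DIFF_LEVEL_ORDER = {"beginner": 0, "intermediate": 1, "advanced": 2}
--
-- def _difficulty_fallback_order(plan_diff: str) -> List[str]:
--     """
--     Приоритет fallback:
--     1) текущий уровень
--     2) на 1 уровень легче
--     3) еще на 1 уровень легче
--     4) на 1 уровень сложнее
--     5) еще на 1 уровень сложнее
--     """
--     if not plan_diff: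
--         return []
--     base = _DIFF_LEVEL_ORDER.get(plan_diff)
--     if base is None:
--         return [plan_diff]
--     order = [base, base - 1, base - 2, base + 1, base + 2]
--     reverse = {v: k for k, v in _DIFF_LEVEL_ORDER.items()}
--     return [reverse[i] for i in order if i in reverse]
-- ===== SOURCE B (Python) =====
-- from typing import Optional, List, Tuple, Dict, Any, Set
--
-- _DIFF_LEVEL_ORDER = {"beginner": 0, "intermediate": 1, "advanced": 2}
--
-- def _difficulty_fallback_order(plan_diff: str) -> List[str]:
--     if not plan_diff:
--         return []
--     base = _DIFF_LEVEL_ORDER.get(plan_diff)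
--     if base is None:
--         return [plan_diff]
--
--     def priority(item):
--         offset = item[1] - base
--         return (0, -offset) if offset <= 0 else (1, offset)
--
--     return [name for name, _ in sorted(_DIFF_LEVEL_ORDER.items(), key=priority)]
-- ===== Notes on version B (the rewrite author's own statement) =====
-- stated objective: alternative
-- what changed: Replaces the offset-list generation, reverse-dict construction and membership filter with a single stable sort of the level table by a priority key (current level first, then easier levels by distance, then harder).
import Mathlib
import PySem

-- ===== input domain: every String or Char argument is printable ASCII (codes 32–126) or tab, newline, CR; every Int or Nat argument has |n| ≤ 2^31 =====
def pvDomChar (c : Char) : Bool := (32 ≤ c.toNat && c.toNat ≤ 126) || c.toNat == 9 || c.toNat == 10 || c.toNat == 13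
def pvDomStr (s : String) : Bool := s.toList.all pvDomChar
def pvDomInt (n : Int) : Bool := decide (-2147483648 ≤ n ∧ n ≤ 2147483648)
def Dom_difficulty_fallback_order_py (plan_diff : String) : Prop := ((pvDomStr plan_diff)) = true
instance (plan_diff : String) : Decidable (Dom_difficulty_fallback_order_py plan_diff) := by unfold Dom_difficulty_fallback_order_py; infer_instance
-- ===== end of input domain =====

-- B replaces A's offset-list + reverse-dict + filter with a single stable sort of the
-- level table by a priority key (alternative decomposition; no speed claim).

-- ===== PORT A =====
def pvDiffLevelOrder : PySem.Dict String Int :=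
  PySem.Dict.ofList [("beginner", 0), ("intermediate", 1), ("advanced", 2)]

def difficulty_fallback_order_py (plan_diff : String) : List String :=
  if plan_diff = "" then []
  else
    match pvDiffLevelOrder.get? plan_diff with
    | none => [plan_diff]
    | some base =>
      let order : List Int := [base, base - 1, base - 2, base + 1, base + 2]
      let reverse : PySem.Dict Int String :=
        pvDiffLevelOrder.items.foldl (fun d kv => d.insert kv.2 kv.1) PySem.Dict.empty
      -- [reverse[i] for i in order if i in reverse]: the guard makes reverse[i] total,
      -- so the comprehension is exactly filterMap over get?
      order.filterMap (fun i => reverse.get? i)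

-- ===== PORT B =====
def difficulty_fallback_order_py_alt (plan_diff : String) : List String :=
  if plan_diff = "" then []
  else
    match pvDiffLevelOrder.get? plan_diff with
    | none => [plan_diff]
    | some base =>
      (PySem.List.sorted2 pvDiffLevelOrder.items
        (fun item => if item.2 - base ≤ 0 then (0 : Int) else 1)
        (fun item => if item.2 - base ≤ 0 then -(item.2 - base) else item.2 - base)).map
        (fun item => item.1)

-- ===== PRECONDITION & SPEC =====
def Spec_difficulty_fallback_order_py (plan_diff : String) (out : List String) : Prop := out = difficulty_fallback_order_py_alt plan_diff
instance (plan_diff : String) (out : List String) : Decidable (Spec_difficulty_fallback_order_py plan_diff out) := by unfold Spec_difficulty_fallback_order_py; infer_instance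

-- ===== CLAIM (what is proved, stated in full; the proofs are below) =====
def Claim_equal_difficulty_fallback_order_py : Prop := ∀ (plan_diff : String), Dom_difficulty_fallback_order_py plan_diff → Spec_difficulty_fallback_order_py plan_diff (difficulty_fallback_order_py plan_diff)

-- ===== LEMMAS AND PROOFS =====

-- For a string that is none of the three level names, both ports hit the 'none' branch.
theorem getLevel_none (s : String) (h0 : s ≠ "beginner") (h1 : s ≠ "intermediate")
    (h2 : s ≠ "advanced") : pvDiffLevelOrder.get? s = none := by
  have hmk : pvDiffLevelOrder =
      PySem.Dict.mk [("beginner", 0), ("intermediate", 1), ("advanced", 2)] := by rfl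
  rw [hmk]
  simp [PySem.Dict.get?_mk_cons, PySem.Dict.get?, Ne.symm h0, Ne.symm h1, Ne.symm h2]

-- ===== VERDICT (by name: the statement is the Claim_ definition above) =====
theorem difficulty_fallback_order_py_spec : Claim_equal_difficulty_fallback_order_py := by
  intro s _
  unfold Spec_difficulty_fallback_order_py
  by_cases e : s = "" ; · subst e; rfl
  by_cases h0 : s = "beginner" ; · subst h0; rfl
  by_cases h1 : s = "intermediate" ; · subst h1; rfl
  by_cases h2 : s = "advanced" ; · subst h2; rfl
  simp [difficulty_fallback_order_py, difficulty_fallback_order_py_alt, e,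
    getLevel_none s h0 h1 h2]
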